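-- pv_equiv track=rewrite | github.com/alex-briasco-stewart/aoc_2023 | 14.py | get_weight_of_line
-- ===== SOURCE A (Python) =====
-- def get_weight_of_line(in_line: str) -> int:
--     total_weight = 0
--     line_len = len(in_line)
--     # scan the line, resetting position to every blocker we see
--     roll_idx_start = 0
--     num_O_seen = 0
--     for idx, ch in enumerate(in_line):
--         if roll_idx_start < 0 and ch in "O.":
--             roll_idx_start = idx
--         if ch == 'O':
--             num_O_seen += 1
--         elif ch == '#':
--             if num_O_seen > 0:
--                 weight_start = line_len - roll_idx_start
--                 total_weight += int((weight_start + weight_start - num_O_seen + 1) * num_O_seen / 2)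
--             num_O_seen = 0
--             roll_idx_start = -1
--             # we know we're done counting Os for this group.
--             # The num_o_seen will end up starting at roll_idx_start
--             #weight_start + weight_start - 1 + weight_start -2 + ... + weight_start - num_o_seen-1
--     # we hit the end
--     if num_O_seen > 0:
--         weight_start = line_len - roll_idx_start
--         total_weight += int((weight_start + weight_start - num_O_seen + 1) * num_O_seen / 2)
--     num_O_seen = 0
--     return total_weight
-- ===== SOURCE B (Python) =====
-- def get_weight_of_line(in_line: str) -> int:
--     # direct tilt simulation: each rock rolls to the next free floor slot
--     n = len(in_line)
--     total = 0
--     next_free = 0  # next resting slot; None while no floor cell seen after a blocker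
--     for idx, ch in enumerate(in_line):
--         if ch == '#':
--             next_free = None
--         elif ch == 'O' or ch == '.':
--             if next_free is None:
--                 next_free = idx
--             if ch == 'O':
--                 total += n - next_free
--                 next_free += 1
--     return total
-- ===== Notes on version B (the rewrite author's own statement) =====
-- stated objective: simpler
-- what changed: Replaces A's group-accumulation with arithmetic-series closed form per blocker group by a direct tilt simulation that keeps a moving next-free-slot pointer and adds each rock's weight incrementally.
import Mathlib
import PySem

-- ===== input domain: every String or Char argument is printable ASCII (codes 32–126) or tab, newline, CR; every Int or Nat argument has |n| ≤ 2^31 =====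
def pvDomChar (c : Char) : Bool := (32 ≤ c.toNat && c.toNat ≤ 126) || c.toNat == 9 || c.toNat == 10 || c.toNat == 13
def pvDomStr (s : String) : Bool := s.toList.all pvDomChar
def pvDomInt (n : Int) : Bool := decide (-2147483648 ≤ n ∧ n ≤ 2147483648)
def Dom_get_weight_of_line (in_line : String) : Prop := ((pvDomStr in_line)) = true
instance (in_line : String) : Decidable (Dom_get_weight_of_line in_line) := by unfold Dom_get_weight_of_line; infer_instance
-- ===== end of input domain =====

-- B replaces A's per-group arithmetic-series accumulation by an incremental tilt simulation
-- with a moving next-free-slot pointer (objective: simpler).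

-- ===== PORT A =====
-- one step of A's loop; state = (total_weight, roll_idx_start, num_O_seen)
-- Python's int((w + w - m + 1) * m / 2) is ported as Int division by 2: the numerator is
-- always even here, so the float division and truncation are exact (proved via pvRel's 2* equation).
def pvStepA (n : Int) (s : Int × Int × Int) (p : Int × Char) : Int × Int × Int :=
  let (total, roll0, numO) := s
  let (idx, ch) := p
  let roll := if roll0 < 0 ∧ (ch = 'O' ∨ ch = '.') then idx else roll0
  if ch = 'O' then (total, roll, numO + 1)
  else if ch = '#' then
    (if numO > 0 then
       let w := n - roll
       total + (w + w - numO + 1) * numO / 2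
     else total, -1, 0)
  else (total, roll, numO)

def get_weight_of_line (in_line : String) : Int :=
  let cs := in_line.toList
  let n : Int := cs.length
  let st := (PySem.List.enumerate cs).foldl (pvStepA n) (0, 0, 0)
  let (total, roll, numO) := st
  if numO > 0 then
    let w := n - roll
    total + (w + w - numO + 1) * numO / 2
  else total

-- ===== PORT B =====
-- one step of B's loop; state = (total, next_free); next_free = none means
-- no floor cell has been seen since the last blocker
def pvStepB (n : Int) (s : Int × Option Int) (p : Int × Char) : Int × Option Int :=
  let (total, nf) := s
  let (idx, ch) := p
  if ch = '#' then (total, none)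
  else if ch = 'O' ∨ ch = '.' then
    let nf2 := nf.getD idx
    if ch = 'O' then (total + (n - nf2), some (nf2 + 1)) else (total, some nf2)
  else (total, nf)

def get_weight_of_line_alt (in_line : String) : Int :=
  let cs := in_line.toList
  let n : Int := cs.length
  ((PySem.List.enumerate cs).foldl (pvStepB n) (0, some 0)).1

-- ===== PRECONDITION & SPEC =====
def Spec_get_weight_of_line (in_line : String) (out : Int) : Prop := out = get_weight_of_line_alt in_line
instance (in_line : String) (out : Int) : Decidable (Spec_get_weight_of_line in_line out) := by unfold Spec_get_weight_of_line; infer_instance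

-- ===== CLAIM (what is proved, stated in full; the proofs are below) =====
def Claim_equal_get_weight_of_line : Prop := ∀ (in_line : String), Dom_get_weight_of_line in_line → Spec_get_weight_of_line in_line (get_weight_of_line in_line)

-- ===== LEMMAS AND PROOFS =====

-- coupling invariant between A's state (tA, roll, m) and B's state (tB, nf)
def pvRel (n tA roll m tB : Int) (nf : Option Int) : Prop :=
  (m = 0 ∧ tB = tA ∧ nf = (if roll < 0 then none else some roll)) ∨
  (0 < m ∧ 0 ≤ roll ∧ nf = some (roll + m) ∧
    2 * tB = 2 * tA + (2 * (n - roll) - m + 1) * m)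

lemma pvRel_step (n tA roll m tB : Int) (nf : Option Int) (idx : Int) (ch : Char)
    (hidx : 0 ≤ idx) (h : pvRel n tA roll m tB nf) :
    pvRel n (pvStepA n (tA, roll, m) (idx, ch)).1 (pvStepA n (tA, roll, m) (idx, ch)).2.1
      (pvStepA n (tA, roll, m) (idx, ch)).2.2
      (pvStepB n (tB, nf) (idx, ch)).1 (pvStepB n (tB, nf) (idx, ch)).2 := by
  by_cases hO : ch = 'O'
  · subst hO
    by_cases hneg : roll < 0
    · -- A: pending group start; invariant forces m = 0 and nf = none
      rcases h with ⟨hm, ht, hnf⟩ | ⟨hm, hr, hnf, ht⟩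
      · have eA : pvStepA n (tA, roll, m) (idx, 'O') = (tA, idx, m + 1) := by
          simp [pvStepA, hneg]
        have eB : pvStepB n (tB, nf) (idx, 'O') = (tB + (n - idx), some (idx + 1)) := by
          simp [pvStepB, hnf, if_pos hneg]

        rw [eA, eB]; dsimp only
        refine Or.inr ⟨by omega, hidx, by simp [hm], ?_⟩
        subst hm; subst ht; ring
      · omega
    · rcases h with ⟨hm, ht, hnf⟩ | ⟨hm, hr, hnf, ht⟩
      · have eA : pvStepA n (tA, roll, m) (idx, 'O') = (tA, roll, m + 1) := by
          simp [pvStepA, hneg]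
        have eB : pvStepB n (tB, nf) (idx, 'O') = (tB + (n - roll), some (roll + 1)) := by
          simp [pvStepB, hnf, hneg]
        rw [eA, eB]; dsimp only
        refine Or.inr ⟨by omega, by omega, by simp [hm], ?_⟩
        subst hm; subst ht; ring
      · have eA : pvStepA n (tA, roll, m) (idx, 'O') = (tA, roll, m + 1) := by
          simp [pvStepA, hneg]
        have eB : pvStepB n (tB, nf) (idx, 'O') =
            (tB + (n - (roll + m)), some (roll + m + 1)) := by
          simp [pvStepB, hnf]
        rw [eA, eB]; dsimp only
        exact Or.inr ⟨by omega, by omega, by rw [add_assoc], by linear_combination ht⟩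
  · by_cases hH : ch = '#'
    · subst hH
      have eB : pvStepB n (tB, nf) (idx, '#') = (tB, none) := by simp [pvStepB]
      rcases h with ⟨hm, ht, hnf⟩ | ⟨hm, hr, hnf, ht⟩
      · have eA : pvStepA n (tA, roll, m) (idx, '#') = (tA, -1, 0) := by
          simp [pvStepA, hm]
        rw [eA, eB]; dsimp only
        exact Or.inl ⟨rfl, ht, by norm_num⟩
      · have hneg : ¬ roll < 0 := by omega
        have eA : pvStepA n (tA, roll, m) (idx, '#') =
            (tA + (n - roll + (n - roll) - m + 1) * m / 2, -1, 0) := by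
          simp [pvStepA, hneg, hm]
        rw [eA, eB]; dsimp only
        refine Or.inl ⟨rfl, ?_, by norm_num⟩
        have heven : (n - roll + (n - roll) - m + 1) * m = 2 * (tB - tA) := by linarith
        rw [heven, Int.mul_ediv_cancel_left _ (by norm_num : (2:Int) ≠ 0)]
        ring
    · by_cases hD : ch = '.'
      · subst hD
        by_cases hneg : roll < 0
        · rcases h with ⟨hm, ht, hnf⟩ | ⟨hm, hr, hnf, ht⟩
          · have eA : pvStepA n (tA, roll, m) (idx, '.') = (tA, idx, m) := by
              simp [pvStepA, hneg]
            have eB : pvStepB n (tB, nf) (idx, '.') = (tB, some idx) := by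
              simp [pvStepB, hnf, if_pos hneg]
            rw [eA, eB]; dsimp only
            exact Or.inl ⟨hm, ht, by simp [show ¬ idx < 0 by omega]⟩
          · omega
        · have eA : pvStepA n (tA, roll, m) (idx, '.') = (tA, roll, m) := by
            simp [pvStepA, hneg]
          rcases h with ⟨hm, ht, hnf⟩ | ⟨hm, hr, hnf, ht⟩
          · have eB : pvStepB n (tB, nf) (idx, '.') = (tB, some roll) := by
              simp [pvStepB, hnf, hneg]
            rw [eA, eB]; dsimp only
            exact Or.inl ⟨hm, ht, by simp [hneg]⟩
          · have eB : pvStepB n (tB, nf) (idx, '.') = (tB, some (roll + m)) := by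
              simp [pvStepB, hnf]
            rw [eA, eB]; dsimp only
            exact Or.inr ⟨hm, hr, rfl, ht⟩
      · -- any other character: both states unchanged
        have eA : pvStepA n (tA, roll, m) (idx, ch) = (tA, roll, m) := by
          simp [pvStepA, hO, hH, hD]
        have eB : pvStepB n (tB, nf) (idx, ch) = (tB, nf) := by
          simp [pvStepB, hO, hH, hD]
        rw [eA, eB]; dsimp only
        exact h

lemma pvRel_fold (n : Int) (ps : List (Int × Char)) :
    ∀ (tA roll m tB : Int) (nf : Option Int), (∀ p ∈ ps, 0 ≤ p.1) → pvRel n tA roll m tB nf →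
    pvRel n (ps.foldl (pvStepA n) (tA, roll, m)).1
      (ps.foldl (pvStepA n) (tA, roll, m)).2.1
      (ps.foldl (pvStepA n) (tA, roll, m)).2.2
      (ps.foldl (pvStepB n) (tB, nf)).1
      (ps.foldl (pvStepB n) (tB, nf)).2 := by
  induction ps with
  | nil => intro tA roll m tB nf _ h; simpa using h
  | cons p ps ih =>
    intro tA roll m tB nf hpos h
    have hstep := pvRel_step n tA roll m tB nf p.1 p.2
      (hpos p (List.mem_cons_self ..)) h
    simp only [List.foldl_cons]
    have hA : pvStepA n (tA, roll, m) p =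
        ((pvStepA n (tA, roll, m) p).1, (pvStepA n (tA, roll, m) p).2.1,
         (pvStepA n (tA, roll, m) p).2.2) := rfl
    have hB : pvStepB n (tB, nf) p =
        ((pvStepB n (tB, nf) p).1, (pvStepB n (tB, nf) p).2) := rfl
    rw [hA, hB]
    exact ih _ _ _ _ _ (fun q hq => hpos q (List.mem_cons_of_mem _ hq))
      (by simpa using hstep)

-- ===== VERDICT (by name: the statement is the Claim_ definition above) =====
theorem get_weight_of_line_spec : Claim_equal_get_weight_of_line := by
  intro in_line _
  unfold Spec_get_weight_of_line get_weight_of_line get_weight_of_line_alt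
  dsimp only
  have hpos : ∀ p ∈ PySem.List.enumerate in_line.toList, 0 ≤ p.1 := by
    intro p hp
    rcases (PySem.List.mem_enumerate_iff _ _ _).1 hp with ⟨k, hk, rfl⟩
    simp
  have h := pvRel_fold ((in_line.toList.length : Int)) (PySem.List.enumerate in_line.toList)
    0 0 0 0 (some 0) hpos (Or.inl ⟨rfl, rfl, by norm_num⟩)
  set F := (PySem.List.enumerate in_line.toList).foldl (pvStepA (in_line.toList.length : Int))
    (0, 0, 0) with hF
  set G := (PySem.List.enumerate in_line.toList).foldl (pvStepB (in_line.toList.length : Int))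
    (0, some 0) with hG
  rcases h with ⟨hm, ht, -⟩ | ⟨hm, hr, hnf, ht⟩
  · have : ¬ F.2.2 > 0 := by omega
    rw [if_neg this, ht]
  · rw [if_pos hm]
    have heven : ((in_line.toList.length : Int) - F.2.1 + ((in_line.toList.length : Int) - F.2.1)
        - F.2.2 + 1) * F.2.2 = 2 * (G.1 - F.1) := by linarith
    rw [heven, Int.mul_ediv_cancel_left _ (by norm_num : (2:Int) ≠ 0)]
    ring
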